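-- pv_equiv track=rewrite | github.com/gfilios/adventofcode2023 | day7/day7.py | card_to_hex
-- ===== SOURCE A (Python) =====
-- symbol_to_hex = [["A", "F"], ["K", "E"], ["Q", "D"], ["J", "C"], ["T", "B"]]
--
-- def card_to_hex(card_value, with_joker=False):
--     hex_representation = card_value
--     if with_joker:
--         hex_representation = hex_representation.replace("J", "1")
--
--     for replacement in symbol_to_hex:
--         hex_representation = hex_representation.replace(replacement[0], replacement[1])
--
--     hex_representation = "0x" + hex_representation
--     return hex_representation
-- ===== SOURCE B (Python) =====
-- def card_to_hex(card_value, with_joker=False):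
--     table = {"A": "F", "K": "E", "Q": "D", "J": "1" if with_joker else "C", "T": "B"}
--     return "0x" + "".join(table.get(c, c) for c in card_value)
-- ===== Notes on version B (the rewrite author's own statement) =====
-- stated objective: idiomatic
-- what changed: Replaces A's five sequential whole-string .replace passes (plus a sixth for the joker) with one translation dict built once and a single character-level pass emitting table.get(c, c).
import Mathlib
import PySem

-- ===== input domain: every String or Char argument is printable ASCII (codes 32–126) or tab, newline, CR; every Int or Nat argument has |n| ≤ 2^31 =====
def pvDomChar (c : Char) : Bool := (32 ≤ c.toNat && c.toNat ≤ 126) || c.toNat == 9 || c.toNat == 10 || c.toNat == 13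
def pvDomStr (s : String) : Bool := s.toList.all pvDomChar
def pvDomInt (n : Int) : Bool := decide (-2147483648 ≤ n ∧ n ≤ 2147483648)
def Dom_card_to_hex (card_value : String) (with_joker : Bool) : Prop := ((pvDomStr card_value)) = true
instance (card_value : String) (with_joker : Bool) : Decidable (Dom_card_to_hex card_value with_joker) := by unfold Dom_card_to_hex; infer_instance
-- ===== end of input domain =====

-- B replaces A's six sequential whole-string replace passes with one translation table and a single character-level pass (idiomatic).


-- ===== PORT A =====
def symbol_to_hex : List (String × String) := [("A", "F"), ("K", "E"), ("Q", "D"), ("J", "C"), ("T", "B")]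

def card_to_hex (card_value : String) (with_joker : Bool) : String :=
  let hex0 := card_value
  let hex1 := if with_joker then PySem.Str.replace hex0 "J" "1" else hex0
  let hex2 := symbol_to_hex.foldl (fun h r => PySem.Str.replace h r.1 r.2) hex1
  "0x" ++ hex2

-- ===== PORT B =====
def cardTable (with_joker : Bool) : PySem.Dict Char Char :=
  ((((PySem.Dict.empty.insert 'A' 'F').insert 'K' 'E').insert 'Q' 'D').insert 'J'
      (if with_joker then '1' else 'C')).insert 'T' 'B'

def card_to_hex_alt (card_value : String) (with_joker : Bool) : String :=
  let table := cardTable with_joker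
  "0x" ++ String.ofList (card_value.toList.map (fun c => table.getD c c))

-- ===== PRECONDITION & SPEC =====
def Spec_card_to_hex (card_value : String) (with_joker : Bool) (out : String) : Prop := out = card_to_hex_alt card_value with_joker
instance (card_value : String) (with_joker : Bool) (out : String) : Decidable (Spec_card_to_hex card_value with_joker out) := by unfold Spec_card_to_hex; infer_instance

-- ===== CLAIM (what is proved, stated in full; the proofs are below) =====
def Claim_equal_card_to_hex : Prop := ∀ (card_value : String) (with_joker : Bool), Dom_card_to_hex card_value with_joker → Spec_card_to_hex card_value with_joker (card_to_hex card_value with_joker)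

-- ===== LEMMAS AND PROOFS =====
-- Chars.replace with a one-character pattern is a character map.
theorem replace_go_single (a b : Char) : ∀ (fuel : Nat) (l acc : List Char), l.length ≤ fuel →
    PySem.Chars.replace.go [a] [b] fuel l acc = acc.reverse ++ l.map (fun c => if c = a then b else c) := by
  intro fuel
  induction fuel with
  | zero => intro l acc h; cases l with
    | nil => simp [PySem.Chars.replace.go]
    | cons c t => simp at h
  | succ n ih =>
    intro l acc h
    cases l with
    | nil => simp [PySem.Chars.replace.go]
    | cons c t =>
      simp only [PySem.Chars.replace.go]
      by_cases hc : c = a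
      · subst hc
        have : List.isPrefixOf [c] (c :: t) = true := by simp [List.isPrefixOf]
        simp only [this, if_pos]
        rw [ih]
        · simp
        · simpa using Nat.le_of_succ_le_succ h
      · have hp : List.isPrefixOf [a] (c :: t) = false := by
          simp [List.isPrefixOf]; exact fun he => (hc he.symm).elim
        rw [hp]
        rw [if_neg (by simp)]
        rw [ih t (c :: acc) (by simpa using Nat.le_of_succ_le_succ h)]
        simp [hc]

theorem replace_single (a b : Char) (s : List Char) :
    PySem.Chars.replace s [a] [b] = s.map (fun c => if c = a then b else c) := by
  rw [PySem.Chars.replace, replace_go_single a b s.length s [] le_rfl]; simp [List.isEmpty]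

theorem cardTable_getD (wj : Bool) (c : Char) :
    (cardTable wj).getD c c = if c = 'T' then 'B' else if c = 'J' then (if wj then '1' else 'C')
      else if c = 'Q' then 'D' else if c = 'K' then 'E' else if c = 'A' then 'F' else c := by
  unfold cardTable
  rw [PySem.Dict.getD_insert, PySem.Dict.getD_insert, PySem.Dict.getD_insert,
    PySem.Dict.getD_insert, PySem.Dict.getD_insert, PySem.Dict.getD_empty]

-- B's per-character table lookup equals the composition of A's six per-character substitutions.
set_option maxHeartbeats 2000000 in
theorem cardTable_getD_eq_subst_chain (wj : Bool) (c : Char) :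
    (cardTable wj).getD c c =
      (fun x => if x = 'T' then 'B' else x)
      ((fun x => if x = 'J' then 'C' else x)
      ((fun x => if x = 'Q' then 'D' else x)
      ((fun x => if x = 'K' then 'E' else x)
      ((fun x => if x = 'A' then 'F' else x)
      (if wj then (if c = 'J' then '1' else c) else c))))) := by
  rw [cardTable_getD]
  cases wj <;> simp only [if_true] <;> split_ifs <;> simp_all

-- ===== VERDICT (by name: the statement is the Claim_ definition above) =====
theorem card_to_hex_spec : Claim_equal_card_to_hex := by
  intro cv wj _
  show card_to_hex cv wj = card_to_hex_alt cv wj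
  apply String.toList_inj.mp
  simp only [card_to_hex, card_to_hex_alt, symbol_to_hex, List.foldl_cons, List.foldl_nil,
    String.toList_append, PySem.Str.toList_replace]
  cases wj <;>
    simp only [if_true, if_false, Bool.false_eq_true,
      PySem.Str.toList_replace] <;>
  · show _ ++ PySem.Chars.replace _ _ _ = _
    simp only [show ("A":String).toList = ['A'] from rfl, show ("F":String).toList = ['F'] from rfl, show ("K":String).toList = ['K'] from rfl, show ("E":String).toList = ['E'] from rfl, show ("Q":String).toList = ['Q'] from rfl, show ("D":String).toList = ['D'] from rfl, show ("J":String).toList = ['J'] from rfl, show ("C":String).toList = ['C'] from rfl, show ("T":String).toList = ['T'] from rfl, show ("B":String).toList = ['B'] from rfl, show ("1":String).toList = ['1'] from rfl]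
    simp only [replace_single, List.map_map, String.toList_ofList]
    refine congrArg _ ?_
    refine (List.map_congr_left ?_).symm
    intro c _
    simpa using cardTable_getD_eq_subst_chain _ c
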